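-- pv_equiv track=rewrite | github.com/VinhLoiIT/vietnamese-htr | utils.py | _tf_3gram
-- ===== SOURCE A (Python) =====
-- def _tf_3gram(word1, word2):
--     tf_count = 0
--     word1 = '##'+word1+'##'
--     word2 = '##'+word2+'##'
--     n_grams1 = [word1[i:i+3] for i in range(len(word1)-2)]
--     n_grams2 = [word2[i:i+3] for i in range(len(word2)-2)]
--     for n_gram1 in n_grams1:
--         for n_gram2 in n_grams2:
--             if n_gram1==n_gram2:
--                 tf_count += 1
--                 break
--     return tf_count
-- ===== SOURCE B (Python) =====
-- def _tf_3gram(word1, word2):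
--     word1 = '##' + word1 + '##'
--     word2 = '##' + word2 + '##'
--     grams1 = sorted([word1[i:i+3] for i in range(len(word1)-2)])
--     grams2 = sorted(set([word2[i:i+3] for i in range(len(word2)-2)]))
--     total = 0
--     i = 0
--     j = 0
--     while i < len(grams1) and j < len(grams2):
--         if grams1[i] < grams2[j]:
--             i += 1
--         elif grams2[j] < grams1[i]:
--             j += 1
--         else:
--             total += 1
--             i += 1
--     return total
-- ===== Notes on version B (the rewrite author's own statement) =====
-- stated objective: faster
-- what changed: Replaced A's nested occurrence-by-occurrence scan (inner loop with break) by a sort-and-merge algorithm: sort word1's trigrams, sort the distinct word2 trigrams, and count matches with a single two-pointer merge scan; correct because the merge meets each word1 trigram occurrence exactly once against the strictly increasing list of word2 trigrams.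
import Mathlib
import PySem

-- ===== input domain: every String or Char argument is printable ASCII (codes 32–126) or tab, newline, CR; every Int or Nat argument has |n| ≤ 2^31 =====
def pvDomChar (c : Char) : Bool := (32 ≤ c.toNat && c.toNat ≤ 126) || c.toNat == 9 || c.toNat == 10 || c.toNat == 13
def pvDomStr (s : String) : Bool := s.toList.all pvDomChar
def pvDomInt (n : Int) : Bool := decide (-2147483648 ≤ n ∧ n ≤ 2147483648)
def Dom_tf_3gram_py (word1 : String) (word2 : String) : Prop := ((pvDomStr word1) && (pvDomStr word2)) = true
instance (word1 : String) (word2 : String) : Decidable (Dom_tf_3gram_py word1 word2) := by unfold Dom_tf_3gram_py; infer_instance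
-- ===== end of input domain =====

-- B replaces A's nested occurrence-by-occurrence scan by a different algorithm: sort the
-- word1 trigrams, sort the distinct word2 trigrams, and count the matches in a single
-- two-pointer merge scan over the two sorted lists (alternative algorithm, no membership test).

-- ===== PORT A =====
-- the padded word '##'+w+'##', on the List Char side (string concatenation is exact here)
def pvPad (w : String) : List Char := "##".toList ++ w.toList ++ "##".toList

-- [word[i:i+3] for i in range(len(word)-2)]
def pvGrams (w : List Char) : List (List Char) :=
  (PySem.List.pyRange 0 ((w.length : Int) - 2) 1).map
    (fun i => PySem.List.slice w (some i) (some (i + 3)))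

-- inner 'for n_gram2 in n_grams2: if n_gram1==n_gram2: tf_count += 1; break'
def pvInnerA (g1 : List Char) (rest : List (List Char)) (cnt : Int) : Int :=
  match rest with
  | [] => cnt
  | g2 :: t => if g1 = g2 then cnt + 1 else pvInnerA g1 t cnt

def tf_3gram_py (word1 : String) (word2 : String) : Int :=
  let n_grams1 := pvGrams (pvPad word1)
  let n_grams2 := pvGrams (pvPad word2)
  n_grams1.foldl (fun tf_count n_gram1 => pvInnerA n_gram1 n_grams2 tf_count) 0

-- ===== PORT B =====
-- the while loop: advancing an index = dropping the head of the remaining sorted list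
def pvMergeB : List (List Char) → List (List Char) → Int → Int
  | [], _, total => total
  | _ :: _, [], total => total
  | a :: as, b :: bs, total =>
    if a < b then pvMergeB as (b :: bs) total
    else if b < a then pvMergeB (a :: as) bs total
    else pvMergeB as (b :: bs) (total + 1)
termination_by s1 s2 _ => s1.length + s2.length

def tf_3gram_py_alt (word1 : String) (word2 : String) : Int :=
  let grams1 := PySem.List.sorted (pvGrams (pvPad word1)) (fun x => x)
  let grams2 := PySem.List.sorted (PySem.Set.ofList (pvGrams (pvPad word2))) (fun x => x)
  pvMergeB grams1 grams2 0

-- ===== PRECONDITION & SPEC =====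
def Spec_tf_3gram_py (word1 : String) (word2 : String) (out : Int) : Prop := out = tf_3gram_py_alt word1 word2
instance (word1 : String) (word2 : String) (out : Int) : Decidable (Spec_tf_3gram_py word1 word2 out) := by unfold Spec_tf_3gram_py; infer_instance

-- ===== CLAIM (what is proved, stated in full; the proofs are below) =====
def Claim_equal_tf_3gram_py : Prop := ∀ (word1 : String) (word2 : String), Dom_tf_3gram_py word1 word2 → Spec_tf_3gram_py word1 word2 (tf_3gram_py word1 word2)

-- ===== LEMMAS AND PROOFS =====

-- inner loop with break = membership test
theorem pvInnerA_eq (g1 : List Char) (rest : List (List Char)) (cnt : Int) :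
    pvInnerA g1 rest cnt = if g1 ∈ rest then cnt + 1 else cnt := by
  induction rest with
  | nil => simp [pvInnerA]
  | cons h t ih =>
    by_cases hg : g1 = h <;> simp [pvInnerA, hg, ih]

-- A's loop counts the trigrams of n1 that occur in n2
theorem tfA_eq_countP (n1 n2 : List (List Char)) (a : Int) :
    n1.foldl (fun c g => pvInnerA g n2 c) a = a + (n1.countP (fun g => decide (g ∈ n2)) : Int) := by
  induction n1 generalizing a with
  | nil => simp
  | cons h t ih =>
    rw [List.foldl_cons, pvInnerA_eq, ih]
    by_cases hm : h ∈ n2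
    · simp [hm]; omega
    · simp [hm]

-- the merge scan over a ≤-sorted list and a strictly-sorted list counts the
-- elements of the first that occur in the second
theorem pvMergeB_eq (s1 s2 : List (List Char)) (t : Int)
    (h1 : s1.Pairwise (· ≤ ·)) (h2 : s2.Pairwise (· < ·)) :
    pvMergeB s1 s2 t = t + (s1.countP (fun g => decide (g ∈ s2)) : Int) := by
  fun_induction pvMergeB s1 s2 t with
  | case1 s2 t => simp
  | case2 a as t => simp
  | case3 a as b bs t hab ih =>
    have hnb : a ∉ b :: bs := by
      intro hmem
      rcases List.mem_cons.mp hmem with h | h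
      · exact absurd (h ▸ hab) (lt_irrefl a)
      · exact absurd (lt_trans hab ((List.pairwise_cons.mp h2).1 _ h)) (lt_irrefl a)
    rw [ih (List.pairwise_cons.mp h1).2 h2, List.countP_cons]
    simp [hnb]
  | case4 a as b bs t hab hba ih =>
    have hge : ∀ x ∈ a :: as, b < x := by
      intro x hx
      rcases List.mem_cons.mp hx with h | h
      · exact h ▸ hba
      · exact lt_of_lt_of_le hba ((List.pairwise_cons.mp h1).1 _ h)
    rw [ih h1 (List.pairwise_cons.mp h2).2]
    congr 2
    apply List.countP_congr
    intro x hx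
    have hxb : x ≠ b := fun h => absurd (h ▸ hge x hx) (lt_irrefl b)
    simp [List.mem_cons, hxb]
  | case5 a as b bs t hab hba ih =>
    have heq : a = b := le_antisymm (not_lt.mp hba) (not_lt.mp hab)
    rw [ih (List.pairwise_cons.mp h1).2 h2, List.countP_cons]
    simp [heq]
    omega

-- ===== VERDICT (by name: the statement is the Claim_ definition above) =====
set_option maxHeartbeats 1000000 in
theorem tf_3gram_py_spec : Claim_equal_tf_3gram_py := by
  intro word1 word2 _
  unfold Spec_tf_3gram_py tf_3gram_py tf_3gram_py_alt
  dsimp only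
  set n1 := pvGrams (pvPad word1) with hn1
  set n2 := pvGrams (pvPad word2) with hn2
  have hp1 : (PySem.List.sorted n1 (fun x => x)).Pairwise (· ≤ ·) := by
    have h := PySem.List.sorted_pairwise (κ := List Char) n1 (fun x => x)
    convert h using 2
  have hp2 : (PySem.List.sorted (PySem.Set.ofList n2) (fun x => x)).Pairwise (· < ·) := by
    have h := PySem.List.sorted_ofList_pairwise_lt (κ := List Char) n2
    convert h using 2
  rw [tfA_eq_countP, pvMergeB_eq _ _ _ hp1 hp2,
    (PySem.List.sorted_perm n1 (fun x => x) false).countP_eq]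
  congr 2
  apply List.countP_congr
  intro g _
  simp [PySem.List.mem_sorted, PySem.Set.mem_ofList]
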